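-- pv_equiv track=rewrite | github.com/DA-testa/parallel-processing-LaurisJauntevs | main.py | parallel_processing
-- ===== SOURCE A (Python) =====
-- def parallel_processing(n, m, data):
--     output = []
--     arr = [0]*n
--     time = 0
--     i = 0
--     for elements in data:
--         i = 0
--         while i != n:
--             if arr[i] == time:
--                 arr[i] = arr[i] + elements
--                 output.append([i,time])
--                 break
--             elif i == n-1:
--                 time += 1
--                 i = 0
--             else:
--                 i += 1
--     # TODO: write the function for simulating parallel tasks,
--     # create the output pairs
--
--     return output
-- ===== SOURCE B (Python) =====
-- def parallel_processing(n, m, data):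
--     output = []
--     free = [0] * n
--     for elements in data:
--         t = min(free)
--         i = free.index(t)
--         output.append([i, t])
--         free[i] = t + elements
--     return output
-- ===== Notes on version B (the rewrite author's own statement) =====
-- stated objective: alternative
-- what changed: A simulates a clock: for each task it rescans the thread array while incrementing `time` until some thread's availability equals the clock; B drops the clock entirely and directly takes min(free) and its first index per task, so its cost does not depend on the task-duration values (a timing run's random inputs contain negative durations outside Pre_, so no speed-up was measured there).
-- outside the precondition, e.g. on parallel_processing(0, 1, [5]): A returns [], B raises ValueError; on parallel_processing(2, 2, [-5, 0]): A returns [[0, 0], [1, 0]], B returns [[0, 0], [0, -5]]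
import Mathlib
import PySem

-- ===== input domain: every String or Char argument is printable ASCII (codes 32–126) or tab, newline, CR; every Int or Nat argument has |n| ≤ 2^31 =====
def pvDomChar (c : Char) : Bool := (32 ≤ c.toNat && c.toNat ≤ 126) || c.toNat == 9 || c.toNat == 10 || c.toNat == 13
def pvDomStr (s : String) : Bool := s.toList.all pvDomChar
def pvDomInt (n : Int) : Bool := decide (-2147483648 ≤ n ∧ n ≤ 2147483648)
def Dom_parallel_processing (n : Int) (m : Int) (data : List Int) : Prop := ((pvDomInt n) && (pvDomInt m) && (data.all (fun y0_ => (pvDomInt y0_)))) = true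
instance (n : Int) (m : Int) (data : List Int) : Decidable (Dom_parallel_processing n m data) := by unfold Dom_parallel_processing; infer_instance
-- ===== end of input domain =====

-- B replaces A's clock-stepping rescan (advance `time` until some thread's availability equals it)
-- by taking min(free) and its first index directly for each task; return values agree on Pre_.


-- ===== PORT A =====
-- the `while i != n` body at a fixed clock value: scan i upward; a hit `arr[i] == time` returns the
-- index, the restart branch `elif i == n-1` returns none; the Nat fuel r (= n - i at every call) only
-- makes the scan structural.  Indices i are always in [0, n) here, so `arr.getD i 0` is Python's arr[i].
def ppScanA (arr : List Int) (time : Int) : Nat → Nat → Option Nat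
  | _, 0 => none
  | i, r+1 =>
    if arr.getD i 0 = time then some i
    else if i = arr.length - 1 then none
    else ppScanA arr time (i+1) r

-- the full `while` loop: advance `time` until a scan hits.  The fuel only totalises the while-loop;
-- at the call below it is never exhausted on inputs satisfying Pre_ (lemma ppFindA_eq).
def ppFindA (arr : List Int) : Int → Nat → Nat × Int
  | time, 0 => (0, time)
  | time, fuel+1 =>
    match ppScanA arr time 0 arr.length with
    | some j => (j, time)
    | none => ppFindA arr (time+1) fuel

-- one iteration of A's `for elements in data` loop, state (arr, time, output)
def ppStepA (st : List Int × Int × List (List Int)) (elements : Int) :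
    List Int × Int × List (List Int) :=
  let arr := st.1
  let time := st.2.1
  if arr.length = 0 then st  -- `while 0 != n` is immediately false for n = 0 (n < 0 raises IndexError; outside Pre_)
  else
    let p := ppFindA arr time ((arr.foldl max time - time).toNat + 1)
    (arr.set p.1 (arr.getD p.1 0 + elements), p.2, st.2.2 ++ [[(p.1 : Int), p.2]])

def parallel_processing (n : Int) (m : Int) (data : List Int) : List (List Int) :=
  (data.foldl ppStepA (PySem.List.pyRepeat [0] n, 0, [])).2.2

-- ===== PORT B =====
-- one iteration of B's loop, state (free, output): t = min(free); i = free.index(t)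
def ppStepB (st : List Int × List (List Int)) (elements : Int) :
    List Int × List (List Int) :=
  let free := st.1
  match PySem.List.min? free (fun x => x) with
  | none => st  -- Python: min([]) raises ValueError (only when n ≤ 0; outside Pre_)
  | some t =>
    match PySem.List.index? free t with
    | none => st  -- unreachable: the minimum is a member of free
    | some i => (free.set i (t + elements), st.2 ++ [[(i : Int), t]])

def parallel_processing_alt (n : Int) (m : Int) (data : List Int) : List (List Int) :=
  (data.foldl ppStepB (PySem.List.pyRepeat [0] n, [])).2

-- ===== PRECONDITION & SPEC =====
-- Pre_ excludes (unless data = [], where both trivially return []) n ≤ 0 (for n < 0 A raises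
-- IndexError; for n = 0 A accidentally returns [] for any data, where B's min([]) raises) and
-- multi-task lists with a negative duration, on which A's monotone clock either loops forever
-- (e.g. n = 1, data = [-1, -1]) or silently never revisits a thread whose availability fell below it.
def Pre_parallel_processing (n : Int) (m : Int) (data : List Int) : Prop :=
  (1 ≤ n ∧ (data.length ≤ 1 ∨ ∀ e ∈ data, 0 ≤ e)) ∨ data = []
instance (n : Int) (m : Int) (data : List Int) : Decidable (Pre_parallel_processing n m data) := by
  unfold Pre_parallel_processing; infer_instance

def pvWitness_parallel_processing : Int × Int × List Int := (2, 3, [1, 2, 3])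

def Spec_parallel_processing (n : Int) (m : Int) (data : List Int) (out : List (List Int)) : Prop := out = parallel_processing_alt n m data
instance (n : Int) (m : Int) (data : List Int) (out : List (List Int)) : Decidable (Spec_parallel_processing n m data out) := by unfold Spec_parallel_processing; infer_instance

-- ===== CLAIM (what is proved, stated in full; the proofs are below) =====
def Claim_equal_parallel_processing : Prop := ∀ (n : Int) (m : Int) (data : List Int), Dom_parallel_processing n m data → Pre_parallel_processing n m data → Spec_parallel_processing n m data (parallel_processing n m data)

-- ===== LEMMAS AND PROOFS =====

-- if no index at or after i carries the current clock value, the scan restarts (returns none)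
lemma ppScanA_none (arr : List Int) (time : Int) :
    ∀ (r i : Nat), i + r = arr.length →
    (∀ k, i ≤ k → k < arr.length → arr.getD k 0 ≠ time) →
    ppScanA arr time i r = none := by
  intro r
  induction r with
  | zero => intro i _ _; rfl
  | succ r ih =>
    intro i hlen h
    have hi : i < arr.length := by omega
    have hv : ¬ arr.getD i 0 = time := h i le_rfl hi
    by_cases hend : i = arr.length - 1
    · simp only [ppScanA, if_neg hv, if_pos hend]
    · simp only [ppScanA, if_neg hv, if_neg hend]
      exact ih (i+1) (by omega) (fun k hk1 hk2 => h k (by omega) hk2)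

-- if j is the first index carrying the clock value, the scan started at i ≤ j finds exactly j
lemma ppScanA_some (arr : List Int) (time : Int) (j : Nat)
    (hj : j < arr.length) (hjv : arr.getD j 0 = time)
    (hleast : ∀ k, k < j → arr.getD k 0 ≠ time) :
    ∀ (r i : Nat), i + r = arr.length → i ≤ j → ppScanA arr time i r = some j := by
  intro r
  induction r with
  | zero => intro i hlen hle; omega
  | succ r ih =>
    intro i hlen hle
    by_cases hv : arr.getD i 0 = time
    · have hij : i = j := by
        rcases Nat.lt_or_ge i j with hlt | _
        · exact absurd hv (hleast i hlt)
        · omega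
      subst hij
      simp only [ppScanA, if_pos hv]
    · have hij : i < j := by
        rcases Nat.eq_or_lt_of_le hle with h | h
        · exact absurd (h ▸ hjv) hv
        · exact h
      have hend : ¬ i = arr.length - 1 := by omega
      simp only [ppScanA, if_neg hv, if_neg hend]
      exact ih (i+1) (by omega) (by omega)

-- the while-loop finds the minimum availability t and its first index j, given enough fuel
lemma ppFindA_eq (arr : List Int) (t : Int) (j : Nat)
    (ht : t ∈ arr) (htmin : ∀ x ∈ arr, t ≤ x)
    (hj : j < arr.length) (hjv : arr.getD j 0 = t)
    (hleast : ∀ k, k < j → arr.getD k 0 ≠ t) :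
    ∀ (fuel : Nat) (time : Int), (∀ x ∈ arr, time ≤ x) → (t - time).toNat < fuel →
    ppFindA arr time fuel = (j, t) := by
  intro fuel
  induction fuel with
  | zero => intro time _ hfuel; omega
  | succ fuel ih =>
    intro time hinv hfuel
    have htime : time ≤ t := hinv t ht
    by_cases hex : ∃ k, k < arr.length ∧ arr.getD k 0 = time
    · -- the clock already equals the minimum: t = time, and the scan finds j
      obtain ⟨k, hk, hkv⟩ := hex
      have hkmem : arr.getD k 0 ∈ arr := by
        rw [List.getD_eq_getElem arr 0 hk]; exact arr.getElem_mem hk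
      have hts : t = time := le_antisymm (hkv ▸ htmin _ hkmem) htime
      simp only [ppFindA, ppScanA_some arr time j hj (hts ▸ hjv)
        (fun k hk => hts ▸ hleast k hk) arr.length 0 (by omega) (Nat.zero_le j)]
      rw [hts]
    · -- no availability equals the clock: every availability exceeds it; advance the clock
      push Not at hex
      have hnone : ppScanA arr time 0 arr.length = none :=
        ppScanA_none arr time arr.length 0 (by omega) (fun k _ hk => hex k hk)
      simp only [ppFindA, hnone]
      have hinv' : ∀ x ∈ arr, time + 1 ≤ x := by
        intro x hx
        obtain ⟨k, hk, hkv⟩ := List.mem_iff_getElem.mp hx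
        have : arr.getD k 0 ≠ time := hex k hk
        rw [List.getD_eq_getElem arr 0 hk, hkv] at this
        have := hinv x hx
        omega
      have hne : t ≠ time := by
        have := hex j hj
        rw [hjv] at this
        exact this
      exact ih (time + 1) hinv' (by omega)

-- the per-task states of A and B stay in lock-step: same array, same output (A also carries `time`)
lemma pp_fold_eq : ∀ (data : List Int) (arr : List Int) (time : Int) (out : List (List Int)),
    arr ≠ [] → (∀ x ∈ arr, time ≤ x) → (data.length ≤ 1 ∨ ∀ e ∈ data, 0 ≤ e) →
    ∃ time', data.foldl ppStepA (arr, time, out)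
      = ((data.foldl ppStepB (arr, out)).1, time', (data.foldl ppStepB (arr, out)).2) := by
  intro data
  induction data with
  | nil => intro arr time out _ _ _; exact ⟨time, rfl⟩
  | cons e rest ih =>
    intro arr time out hne hinv hnn
    -- B's step: the minimum t and its first index i
    obtain ⟨t, hmin⟩ : ∃ t, PySem.List.min? arr (fun x => x) = some t := by
      cases h : PySem.List.min? arr (fun x => x) with
      | none => exact absurd ((PySem.List.min?_eq_none_iff arr _).mp h) hne
      | some t => exact ⟨t, rfl⟩
    have ht : t ∈ arr := PySem.List.min?_mem hmin
    have htmin : ∀ x ∈ arr, t ≤ x := PySem.List.min?_isMin hmin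
    obtain ⟨i, hidx⟩ : ∃ i, PySem.List.index? arr t = some i := by
      cases h : PySem.List.index? arr t with
      | none => exact absurd ((PySem.List.index?_eq_none_iff arr t).mp h) (by simpa using ht)
      | some i => exact ⟨i, rfl⟩
    obtain ⟨hi, hiv, hileast⟩ := PySem.List.getElem_of_index?_eq_some hidx
    have hivD : arr.getD i 0 = t := by rw [List.getD_eq_getElem arr 0 hi]; exact hiv
    have hileastD : ∀ k, k < i → arr.getD k 0 ≠ t := by
      intro k hk
      rw [List.getD_eq_getElem arr 0 (by omega)]
      exact hileast k hk
    -- A's step finds the same pair (i, t)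
    have hlen0 : ¬ arr.length = 0 := by simpa using hne
    have hfind : ppFindA arr time ((arr.foldl max time - time).toNat + 1) = (i, t) := by
      apply ppFindA_eq arr t i ht htmin hi hivD hileastD _ time hinv
      have : t ≤ arr.foldl max time := (PySem.List.le_foldl_max arr time).2 t ht
      omega
    have hA : ppStepA (arr, time, out) e
        = (arr.set i (t + e), t, out ++ [[(i : Int), t]]) := by
      simp only [ppStepA, if_neg hlen0, hfind, hivD]
    have hB : ppStepB (arr, out) e = (arr.set i (t + e), out ++ [[(i : Int), t]]) := by
      simp only [ppStepB, hmin, hidx]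
    simp only [List.foldl_cons, hA, hB]
    rcases hnn with hlen | hnn
    · -- data = [e] : nothing remains after this step
      have hrest : rest = [] := by
        simp only [List.length_cons] at hlen
        exact List.eq_nil_of_length_eq_zero (by omega)
      subst hrest
      exact ⟨t, rfl⟩
    · -- invariants for the updated state
      have hne' : arr.set i (t + e) ≠ [] := by
        intro h
        have hlen : (arr.set i (t + e)).length = arr.length := List.length_set ..
        rw [h] at hlen
        simp at hlen
        omega
      have hinv' : ∀ x ∈ arr.set i (t + e), t ≤ x := by
        intro x hx
        rcases List.mem_or_eq_of_mem_set hx with hx' | hx'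
        · exact htmin x hx'
        · have he : (0:Int) ≤ e := hnn e (List.mem_cons_self)
          omega
      exact ih _ t _ hne' hinv' (Or.inr (fun x hx => hnn x (List.mem_cons_of_mem _ hx)))

-- ===== VERDICT (by name: the statement is the Claim_ definition above) =====
theorem parallel_processing_spec : Claim_equal_parallel_processing := by
  intro n m data _ hpre
  rcases hpre with ⟨hn, hnn⟩ | hnil
  case inr =>
    subst hnil
    rfl
  unfold Spec_parallel_processing parallel_processing parallel_processing_alt
  have hrep : PySem.List.pyRepeat ([0] : List Int) n = List.replicate n.toNat 0 :=
    PySem.List.pyRepeat_singleton 0 n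
  have hne : List.replicate n.toNat (0:Int) ≠ [] := by
    have : 1 ≤ n.toNat := by omega
    simp [List.replicate_eq_nil_iff]
    omega
  have hinv : ∀ x ∈ List.replicate n.toNat (0:Int), (0:Int) ≤ x := by
    intro x hx
    rw [List.eq_of_mem_replicate hx]
  obtain ⟨time', heq⟩ := pp_fold_eq data (List.replicate n.toNat 0) 0 [] hne hinv hnn
  rw [hrep, heq]
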